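-- pv_equiv track=rewrite | github.com/kms70847/Advent-of-Code-2020 | 14/main.py | apply_mask_v2
-- ===== SOURCE A (Python) =====
-- def apply_mask_v2(mask, value):
--     def iter_possible_masks(mask):
--         if mask.count("X") == 0:
--             yield int(mask, 2)
--         else:
--             for c in "01":
--                 yield from iter_possible_masks(mask.replace("X", c, 1))
--     value = f"{value:036b}"
--     mask = "".join({"0":v,"1":"1","X":"X"}[m] for m,v in zip(mask,value))
--     yield from iter_possible_masks(mask)
-- ===== SOURCE B (Python) =====
-- def apply_mask_v2(mask, value):
--     bits = f"{value:036b}"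
--     merged = "".join({"0": v, "1": "1", "X": "X"}[m] for m, v in zip(mask, bits))
--     combos = [""]
--     for _ in range(merged.count("X")):
--         combos = [t + b for t in combos for b in "01"]
--     for t in combos:
--         it = iter(t)
--         yield int("".join(next(it) if c == "X" else c for c in merged), 2)
-- ===== Notes on version B (the rewrite author's own statement) =====
-- stated objective: alternative
-- what changed: A's recursive generator that repeatedly replaces the first X and recurses is replaced by an iterative breadth-first construction of all bit combinations followed by a single substitution pass per combination.
import Mathlib
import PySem

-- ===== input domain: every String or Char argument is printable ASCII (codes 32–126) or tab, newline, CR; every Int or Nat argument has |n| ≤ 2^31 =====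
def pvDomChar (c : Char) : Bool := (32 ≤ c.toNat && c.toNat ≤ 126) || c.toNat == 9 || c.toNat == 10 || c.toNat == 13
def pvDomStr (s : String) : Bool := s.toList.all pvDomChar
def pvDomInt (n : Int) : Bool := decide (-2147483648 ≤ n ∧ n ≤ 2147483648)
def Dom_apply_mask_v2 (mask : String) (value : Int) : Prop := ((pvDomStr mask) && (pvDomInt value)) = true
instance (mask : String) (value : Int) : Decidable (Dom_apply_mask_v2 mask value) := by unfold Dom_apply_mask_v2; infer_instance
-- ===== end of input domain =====

-- B replaces A's recursive replace-first-X generator by an iterative breadth-first build of all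
-- bit combinations plus a single-pass substitution (objective: alternative decomposition, same cost).
-- Both A and B are Python generators; the equivalence is about the sequence of yielded values.

-- ===== PORT A =====

-- shared by both ports: f"{value:036b}" (binary digits of |value|, zero-padded; '-' prefix if negative)
def natBin (n : Nat) : List Char :=
  if n < 2 then [if n = 1 then '1' else '0']
  else natBin (n / 2) ++ [if n % 2 = 1 then '1' else '0']
decreasing_by exact Nat.div_lt_self (by omega) (by omega)

def pad0 (w : Nat) (l : List Char) : List Char := List.replicate (w - l.length) '0' ++ l

def fmt036b (value : Int) : List Char :=
  if value < 0 then '-' :: pad0 35 (natBin value.natAbs) else pad0 36 (natBin value.natAbs)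

-- shared by both ports: int(s, 2); exact on optional '-' followed by binary digits (none = ValueError)
def binGo (acc : Int) : List Char → Option Int
  | [] => some acc
  | c :: r => if c = '0' then binGo (2 * acc) r
              else if c = '1' then binGo (2 * acc + 1) r else none

def parseBin? (l : List Char) : Option Int :=
  match l with
  | [] => none
  | '-' :: r => if r.isEmpty then none else (binGo 0 r).map (fun x => -x)
  | l => binGo 0 l

-- A's merge: {"0":v,"1":"1","X":"X"}[m]; '?' stands for the KeyError case, excluded by Pre_
def mergeA (ms vs : List Char) : List Char :=
  (ms.zip vs).map (fun p => if p.1 = '0' then p.2 else if p.1 = '1' then '1'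
                            else if p.1 = 'X' then 'X' else '?')

-- mask.replace("X", c, 1)
def replX (l : List Char) (c : Char) : List Char :=
  match l with
  | [] => []
  | a :: r => if a = 'X' then c :: r else a :: replX r c

-- termination lemma for iterA, cited by its decreasing_by
theorem countX_replX (l : List Char) (c : Char) (hc : ¬ c = 'X') (h : ¬ l.count 'X' = 0) :
    (replX l c).count 'X' < l.count 'X' := by
  induction l with
  | nil => simp at h
  | cons a r ih =>
    by_cases ha : a = 'X'
    · simp [replX, ha, hc]
    · simp [replX, ha] at *
      omega

-- iter_possible_masks; int(mask,2)'s ValueError ('.getD 0') is excluded by Pre_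
def iterA (l : List Char) : List Int :=
  if h : l.count 'X' = 0 then [(parseBin? l).getD 0]
  else iterA (replX l '0') ++ iterA (replX l '1')
termination_by l.count 'X'
decreasing_by
  · exact countX_replX l '0' (by decide) h
  · exact countX_replX l '1' (by decide) h

def apply_mask_v2 (mask : String) (value : Int) : List Int :=
  iterA (mergeA mask.toList (fmt036b value))

-- ===== PORT B =====

-- B's merge is A's same dict line: {"0":v,"1":"1","X":"X"}[m]
def mergeB (ms vs : List Char) : List Char :=
  (ms.zip vs).map (fun p => if p.1 = '0' then p.2 else if p.1 = '1' then '1'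
                            else if p.1 = 'X' then 'X' else '?')

-- one round of: combos = [t + b for t in combos for b in "01"]
def combosStep (L : List (List Char)) : List (List Char) :=
  L.flatMap (fun t => [t ++ ['0'], t ++ ['1']])

-- the loop 'for _ in range(k): combos = combosStep(combos)' starting from [""]
def combos (k : Nat) : List (List Char) :=
  match k with
  | 0 => [[]]
  | k + 1 => combosStep (combos k)

-- "".join(next(it) if c == "X" else c for c in merged); '?' = StopIteration, unreachable
def substB (l : List Char) (bs : List Char) : List Char :=
  match l with
  | [] => []
  | c :: r => if c = 'X' then bs.headD '?' :: substB r bs.tail else c :: substB r bs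

def apply_mask_v2_alt (mask : String) (value : Int) : List Int :=
  let merged := mergeB mask.toList (fmt036b value)
  (combos (merged.count 'X')).map (fun t => (parseBin? (substB merged t)).getD 0)

-- ===== PRECONDITION & SPEC =====
-- Pre_ excludes exactly the inputs where the Python A raises: a mask with a character outside
-- "01X" (KeyError in the merge), the empty mask (int("",2) ValueError), and mask "0" with a
-- negative value (the merged string is just "-", int("-",2) ValueError).
def Pre_apply_mask_v2 (mask : String) (value : Int) : Prop :=
  (!mask.toList.isEmpty && mask.toList.all (fun c => c == '0' || c == '1' || c == 'X')
    && !(mask == "0" && decide (value < 0))) = true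
instance (mask : String) (value : Int) : Decidable (Pre_apply_mask_v2 mask value) := by
  unfold Pre_apply_mask_v2; infer_instance

def pvWitness_apply_mask_v2 : String × Int := ("X0X", 5)

def Spec_apply_mask_v2 (mask : String) (value : Int) (out : List Int) : Prop := out = apply_mask_v2_alt mask value
instance (mask : String) (value : Int) (out : List Int) : Decidable (Spec_apply_mask_v2 mask value out) := by unfold Spec_apply_mask_v2; infer_instance

-- ===== CLAIM (what is proved, stated in full; the proofs are below) =====
def Claim_equal_apply_mask_v2 : Prop := ∀ (mask : String) (value : Int), Dom_apply_mask_v2 mask value → Pre_apply_mask_v2 mask value → Spec_apply_mask_v2 mask value (apply_mask_v2 mask value)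

-- ===== LEMMAS AND PROOFS =====

-- replacing the first X drops the X-count by exactly one
theorem countX_replX_eq (l : List Char) (b : Char) (hb : ¬ b = 'X') (h : ¬ l.count 'X' = 0) :
    (replX l b).count 'X' + 1 = l.count 'X' := by
  induction l with
  | nil => simp at h
  | cons a r ih =>
    by_cases ha : a = 'X'
    · simp [replX, ha, hb]
    · simp [ha] at h
      simp [replX, ha, ih h]

-- with no X left, the substitution pass is the identity (next is never called)
theorem substB_noX (l : List Char) (bs : List Char) (h : l.count 'X' = 0) :
    substB l bs = l := by
  induction l generalizing bs with
  | nil => rfl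
  | cons c r ih =>
    simp [List.count_cons] at h
    simp [substB, h.2, ih bs h.1]

-- consuming the first bit of the iterator = replacing the first X
theorem substB_cons (l : List Char) (b : Char) (bs : List Char)
    (hb : ¬ b = 'X') (h : ¬ l.count 'X' = 0) :
    substB l (b :: bs) = substB (replX l b) bs := by
  induction l with
  | nil => simp at h
  | cons c r ih =>
    by_cases hc : c = 'X'
    · simp [substB, replX, hc, hb]
    · simp [hc] at h
      simp [substB, replX, hc, ih h]

theorem combosStep_append (L1 L2 : List (List Char)) :
    combosStep (L1 ++ L2) = combosStep L1 ++ combosStep L2 := by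
  simp [combosStep]

theorem combosStep_map_cons (c : Char) (L : List (List Char)) :
    combosStep (L.map (fun t => c :: t)) = (combosStep L).map (fun t => c :: t) := by
  simp [combosStep, List.flatMap_map, List.map_flatMap]

-- the breadth-first build, read front-to-back: first all tuples starting with '0', then with '1'
theorem combos_succ (k : Nat) :
    combos (k + 1) = (combos k).map (fun t => '0' :: t) ++ (combos k).map (fun t => '1' :: t) := by
  induction k with
  | zero => rfl
  | succ k ih =>
    calc combos (k + 2) = combosStep (combos (k + 1)) := rfl
      _ = combosStep ((combos k).map (fun t => '0' :: t) ++ (combos k).map (fun t => '1' :: t)) := by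
            rw [ih]
      _ = combosStep ((combos k).map (fun t => '0' :: t)) ++
          combosStep ((combos k).map (fun t => '1' :: t)) := combosStep_append _ _
      _ = (combosStep (combos k)).map (fun t => '0' :: t) ++
          (combosStep (combos k)).map (fun t => '1' :: t) := by
            rw [combosStep_map_cons, combosStep_map_cons]
      _ = (combos (k + 1)).map (fun t => '0' :: t) ++ (combos (k + 1)).map (fun t => '1' :: t) := rfl

-- main invariant: A's recursion over the merged string = B's map over all bit combinations
theorem iterA_eq_combos (k : Nat) (l : List Char) (hk : l.count 'X' = k) :
    iterA l = (combos k).map (fun t => (parseBin? (substB l t)).getD 0) := by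
  induction k generalizing l with
  | zero =>
    rw [iterA, dif_pos hk]
    simp [combos, substB_noX l [] hk]
  | succ k ih =>
    have h : ¬ l.count 'X' = 0 := by omega
    rw [iterA, dif_neg h, combos_succ, List.map_append, List.map_map, List.map_map]
    simp only [Function.comp_def]
    have h0 : ∀ b : Char, ¬ b = 'X' →
        ((combos k).map (fun t => (parseBin? (substB l (b :: t))).getD 0)) = iterA (replX l b) := by
      intro b hb
      rw [ih (replX l b) (by have := countX_replX_eq l b hb h; omega)]
      apply List.map_congr_left
      intro t _
      rw [substB_cons l b t hb h]
    rw [h0 '0' (by decide), h0 '1' (by decide)]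

-- ===== VERDICT (by name: the statement is the Claim_ definition above) =====
theorem apply_mask_v2_spec : Claim_equal_apply_mask_v2 := by
  intro mask value _ _
  unfold Spec_apply_mask_v2 apply_mask_v2 apply_mask_v2_alt
  have h : mergeB mask.toList (fmt036b value) = mergeA mask.toList (fmt036b value) := rfl
  rw [h]
  exact iterA_eq_combos _ _ rfl
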